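-- pv_equiv track=rewrite | github.com/xie-st/OhMyCode | ohmycode/memory/memory.py | _parse_frontmatter_meta
-- ===== SOURCE A (Python) =====
-- def _parse_frontmatter_meta(content: str) -> tuple[str, str]:
--     """Extract name and type from frontmatter block."""
--     name = "unknown"
--     mem_type = "general"
--     if content.startswith("---"):
--         end = content.find("\n---", 3)
--         if end != -1:
--             frontmatter = content[3:end]
--             for line in frontmatter.splitlines():
--                 if line.startswith("name:"):
--                     name = line.split(":", 1)[1].strip()
--                 elif line.startswith("type:"):
--                     mem_type = line.split(":", 1)[1].strip()
--     return name, mem_type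
-- ===== SOURCE B (Python) =====
-- def _parse_frontmatter_meta(content: str) -> tuple[str, str]:
--     """Extract name and type from frontmatter block (reverse scan, early exit)."""
--     name = None
--     mem_type = None
--     if content.startswith("---"):
--         end = content.find("\n---", 3)
--         if end != -1:
--             for line in reversed(content[3:end].splitlines()):
--                 if name is None and line.startswith("name:"):
--                     name = line.split(":", 1)[1].strip()
--                 if mem_type is None and line.startswith("type:"):
--                     mem_type = line.split(":", 1)[1].strip()
--                 if name is not None and mem_type is not None:
--                     break
--     return (name if name is not None else "unknown",
--             mem_type if mem_type is not None else "general")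
-- ===== Notes on version B (the rewrite author's own statement) =====
-- stated objective: alternative
-- what changed: Replaces the forward if/elif last-wins reassignment loop by a back-to-front scan over the frontmatter lines with Option accumulators and an early break once both name and type are found (reverse first-wins = forward last-wins).
import Mathlib
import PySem

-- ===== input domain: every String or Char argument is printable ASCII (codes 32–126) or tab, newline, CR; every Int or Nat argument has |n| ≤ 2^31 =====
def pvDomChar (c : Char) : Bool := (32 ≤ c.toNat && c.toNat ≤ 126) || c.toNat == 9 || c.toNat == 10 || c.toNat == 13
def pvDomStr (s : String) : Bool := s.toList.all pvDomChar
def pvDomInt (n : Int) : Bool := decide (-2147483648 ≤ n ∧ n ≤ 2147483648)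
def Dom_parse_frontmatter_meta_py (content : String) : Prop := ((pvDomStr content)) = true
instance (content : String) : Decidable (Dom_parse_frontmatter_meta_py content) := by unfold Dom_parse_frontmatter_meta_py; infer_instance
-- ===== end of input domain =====

-- B replaces A's forward if/elif reassignment by a back-to-front scan with Option
-- accumulators and early exit once both fields are found (alternative decomposition).


-- ===== PORT A =====
-- line.split(":", 1)[1].strip(); the [1] index is only reached under a 'startswith'
-- guard that guarantees the split has two parts, so the total getD rendering is exact.
def pvSplitVal (line : String) : String :=
  PySem.Str.strip (((PySem.Str.splitMax? line ":" 1).getD []).getD 1 "")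

def pvStepA (st : String × String) (line : String) : String × String :=
  if PySem.Str.startswith line "name:" then (pvSplitVal line, st.2)
  else if PySem.Str.startswith line "type:" then (st.1, pvSplitVal line)
  else st

def parse_frontmatter_meta_py (content : String) : String × String :=
  let init : String × String := ("unknown", "general")
  if PySem.Str.startswith content "---" then
    let e := PySem.Str.findFrom content "\n---" 3
    if e ≠ -1 then
      (PySem.Str.splitlines (PySem.Str.slice content (some 3) (some e))).foldl pvStepA init
    else init
  else init

-- ===== PORT B =====
def pvGoB : List String → Option String × Option String → Option String × Option String
  | [], st => st
  | line :: rest, (n, t) =>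
    let n' := if n.isNone && PySem.Str.startswith line "name:" then some (pvSplitVal line) else n
    let t' := if t.isNone && PySem.Str.startswith line "type:" then some (pvSplitVal line) else t
    if n'.isSome && t'.isSome then (n', t') else pvGoB rest (n', t')

def parse_frontmatter_meta_py_alt (content : String) : String × String :=
  let st :=
    if PySem.Str.startswith content "---" then
      let e := PySem.Str.findFrom content "\n---" 3
      if e ≠ -1 then
        pvGoB (PySem.Str.splitlines (PySem.Str.slice content (some 3) (some e))).reverse
          (none, none)
      else (none, none)
    else (none, none)
  (st.1.getD "unknown", st.2.getD "general")

-- ===== PRECONDITION & SPEC =====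
def Spec_parse_frontmatter_meta_py (content : String) (out : String × String) : Prop := out = parse_frontmatter_meta_py_alt content
instance (content : String) (out : String × String) : Decidable (Spec_parse_frontmatter_meta_py content out) := by unfold Spec_parse_frontmatter_meta_py; infer_instance

-- ===== CLAIM (what is proved, stated in full; the proofs are below) =====
def Claim_equal_parse_frontmatter_meta_py : Prop := ∀ (content : String), Dom_parse_frontmatter_meta_py content → Spec_parse_frontmatter_meta_py content (parse_frontmatter_meta_py content)

-- ===== LEMMAS AND PROOFS =====

-- a line cannot start with both "name:" and "type:"
theorem pv_not_both (l : List Char) (h1 : PySem.Chars.startswith l ['n', 'a', 'm', 'e', ':'] = true)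
    (h2 : PySem.Chars.startswith l ['t', 'y', 'p', 'e', ':'] = true) : False := by
  rw [PySem.Chars.startswith_iff] at h1 h2
  obtain ⟨r, rfl⟩ := h1
  simp [List.cons_prefix_cons] at h2

-- reverse scan with Option accumulators = forward last-wins fold, componentwise override
theorem pvGoB_reverse (ls : List String) (n t : Option String) :
    ((pvGoB ls.reverse (n, t)).1.getD "unknown", (pvGoB ls.reverse (n, t)).2.getD "general")
      = (n.getD (ls.foldl pvStepA ("unknown", "general")).1,
         t.getD (ls.foldl pvStepA ("unknown", "general")).2) := by
  induction ls using List.reverseRecOn generalizing n t with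
  | nil => cases n <;> cases t <;> simp [pvGoB]
  | append_singleton ls' x ih =>
    by_cases hboth : PySem.Chars.startswith x.toList ['n', 'a', 'm', 'e', ':'] = true
        ∧ PySem.Chars.startswith x.toList ['t', 'y', 'p', 'e', ':'] = true
    · exact (pv_not_both x.toList hboth.1 hboth.2).elim
    · rw [List.reverse_append]
      simp only [List.reverse_cons, List.reverse_nil, List.nil_append, List.singleton_append,
        List.foldl_append, List.foldl_cons, List.foldl_nil]
      show ((pvGoB (x :: ls'.reverse) (n, t)).1.getD "unknown",
            (pvGoB (x :: ls'.reverse) (n, t)).2.getD "general") = _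
      rw [pvGoB]
      cases n <;> cases t <;>
        rcases hname : PySem.Str.startswith x "name:" <;>
        rcases htype : PySem.Str.startswith x "type:" <;>
        simp_all [pvStepA, Option.getD]

-- ===== VERDICT (by name: the statement is the Claim_ definition above) =====
theorem parse_frontmatter_meta_py_spec : Claim_equal_parse_frontmatter_meta_py := by
  intro content _
  unfold Spec_parse_frontmatter_meta_py parse_frontmatter_meta_py parse_frontmatter_meta_py_alt
  by_cases h1 : PySem.Str.startswith content "---" = true
  · by_cases h2 : PySem.Str.findFrom content "\n---" 3 = -1
    · have h2' : ¬ (PySem.Str.findFrom content "\n---" 3 ≠ -1) := not_not_intro h2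
      simp only [if_pos h1, if_neg h2']
      rfl
    · simp only [if_pos h1, if_pos h2]
      have key := pvGoB_reverse
        (PySem.Str.splitlines (PySem.Str.slice content (some 3)
          (some (PySem.Str.findFrom content "\n---" 3)))) none none
      simp only [Option.getD_none] at key
      rw [key]
  · simp only [if_neg h1]
    rfl
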